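-- pv_equiv track=rewrite | github.com/leeim97/preparingForCodeTest | 프로그래머스/1/42840. 모의고사/모의고사.py | solution
-- ===== SOURCE A (Python) =====
-- def solution(answers):
--     answer = []
--     one = [1,2,3,4,5]
--     two = [2,1,2,3,2,4,2,5]
--     three = [3,3,1,1,2,2,4,4,5,5]
--     cnt = [0,0,0]
--
--     for num,ans in enumerate(answers):
--         if one[num%len(one)]== ans:
--             cnt[0]+=1
--         if two[num%len(two)]== ans:
--             cnt[1]+=1
--         if three[num%len(three)]== ans:
--             cnt[2]+=1
--
--     index = []
--     ma = max(cnt)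
--
--     for i,num in enumerate(cnt):
--         if ma == num:
--             index.append(i+1)
--
--
--     return index
-- ===== SOURCE B (Python) =====
-- def solution(answers):
--     # Histogram approach: one pass builds a counter keyed by (position mod 40, answer)
--     # (40 = lcm of the three pattern lengths), then each supervisor's score is a
--     # fixed 40-term table lookup sum, independent of the input length.
--     hist = {}
--     for i, a in enumerate(answers):
--         key = (i % 40, a)
--         hist[key] = hist.get(key, 0) + 1
--     patterns = [[1, 2, 3, 4, 5],
--                 [2, 1, 2, 3, 2, 4, 2, 5],
--                 [3, 3, 1, 1, 2, 2, 4, 4, 5, 5]]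
--     scores = []
--     for pat in patterns:
--         scores.append(sum(hist.get((r, pat[r % len(pat)]), 0) for r in range(40)))
--     best = max(scores)
--     return [k + 1 for k in range(3) if scores[k] == best]
-- ===== Notes on version B (the rewrite author's own statement) =====
-- stated objective: alternative
-- what changed: B replaces the per-element pattern comparisons by a histogram: one pass builds a dict counting occurrences of (position mod 40, answer) pairs (40 = lcm of the pattern lengths), after which each supervisor's score is a fixed 40-term table-lookup sum; winner selection is a range comprehension instead of an append loop.
import Mathlib
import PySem

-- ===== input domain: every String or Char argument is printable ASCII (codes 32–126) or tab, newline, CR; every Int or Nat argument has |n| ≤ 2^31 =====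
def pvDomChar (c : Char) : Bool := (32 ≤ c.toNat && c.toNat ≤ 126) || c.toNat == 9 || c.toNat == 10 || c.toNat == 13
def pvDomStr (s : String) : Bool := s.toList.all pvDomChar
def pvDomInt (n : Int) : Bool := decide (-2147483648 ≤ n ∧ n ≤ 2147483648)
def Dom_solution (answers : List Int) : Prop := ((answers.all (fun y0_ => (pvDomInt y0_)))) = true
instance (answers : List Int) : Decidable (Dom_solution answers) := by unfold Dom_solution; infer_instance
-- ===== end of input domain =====

-- B replaces A's per-element pattern comparisons by a histogram over (position mod 40, answer)
-- pairs (40 = lcm of the pattern lengths); each score becomes a fixed 40-term lookup sum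
-- (objective: alternative — a different algorithm of the same cost).

-- ===== PORT A =====
-- one interleaved pass over enumerate(answers) updating the triple cnt, then max and an append loop.
-- cnt = [0,0,0] mutated by index is ported as an (Int × Int × Int) accumulator.
-- indices num % len(pat) are always in range, so pyGet? is always some; getD 0 is exact.
def solution (answers : List Int) : List Int :=
  let one : List Int := [1, 2, 3, 4, 5]
  let two : List Int := [2, 1, 2, 3, 2, 4, 2, 5]
  let three : List Int := [3, 3, 1, 1, 2, 2, 4, 4, 5, 5]
  let cnt : Int × Int × Int :=
    (PySem.List.enumerate answers 0).foldl
      (fun (c : Int × Int × Int) p =>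
        (if (PySem.List.pyGet? one (PySem.Int.mod p.1 (one.length : Int))).getD 0 == p.2 then c.1 + 1 else c.1,
         if (PySem.List.pyGet? two (PySem.Int.mod p.1 (two.length : Int))).getD 0 == p.2 then c.2.1 + 1 else c.2.1,
         if (PySem.List.pyGet? three (PySem.Int.mod p.1 (three.length : Int))).getD 0 == p.2 then c.2.2 + 1 else c.2.2))
      (0, 0, 0)
  let cntList : List Int := [cnt.1, cnt.2.1, cnt.2.2]
  -- cntList is nonempty, so max? is always some; getD 0 is exact
  let ma : Int := (PySem.List.max? cntList (fun x => x)).getD 0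
  (PySem.List.enumerate cntList 0).foldl
    (fun (index : List Int) p => if ma == p.2 then index ++ [p.1 + 1] else index) []

-- ===== PORT B =====
-- hist: the dict counting (i % 40, a) pairs, built by hist[key] = hist.get(key, 0) + 1
def histB (answers : List Int) : PySem.Dict (Int × Int) Int :=
  (PySem.List.enumerate answers 0).foldl
    (fun d p =>
      d.insert (PySem.Int.mod p.1 40, p.2) (d.getD (PySem.Int.mod p.1 40, p.2) 0 + 1))
    PySem.Dict.empty

-- sum(hist.get((r, pat[r % len(pat)]), 0) for r in range(40)); indices in range, getD 0 exact
def scorePat (hist : PySem.Dict (Int × Int) Int) (pat : List Int) : Int :=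
  (PySem.List.pyRange 0 40 1).foldl
    (fun s r =>
      s + hist.getD (r, (PySem.List.pyGet? pat (PySem.Int.mod r (pat.length : Int))).getD 0) 0) 0

def solution_alt (answers : List Int) : List Int :=
  let hist := histB answers
  let patterns : List (List Int) :=
    [[1, 2, 3, 4, 5], [2, 1, 2, 3, 2, 4, 2, 5], [3, 3, 1, 1, 2, 2, 4, 4, 5, 5]]
  let scores : List Int := patterns.foldl (fun acc pat => acc ++ [scorePat hist pat]) []
  -- scores is nonempty, so max? is always some; getD 0 is exact
  let best : Int := (PySem.List.max? scores (fun x => x)).getD 0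
  ((PySem.List.pyRange 0 3 1).filter
      (fun k => (PySem.List.pyGet? scores k).getD 0 == best)).map (fun k => k + 1)

-- ===== PRECONDITION & SPEC =====
def Spec_solution (answers : List Int) (out : List Int) : Prop := out = solution_alt answers
instance (answers : List Int) (out : List Int) : Decidable (Spec_solution answers out) := by unfold Spec_solution; infer_instance

-- ===== CLAIM (what is proved, stated in full; the proofs are below) =====
def Claim_equal_solution : Prop := ∀ (answers : List Int), Dom_solution answers → Spec_solution answers (solution answers)

-- ===== LEMMAS AND PROOFS =====

-- A's one interleaved counting pass is the triple of three independent counting passes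
theorem foldl_split3 (f g h : Int × Int → Bool) (l : List (Int × Int)) :
    ∀ c0 c1 c2 : Int,
      l.foldl (fun (c : Int × Int × Int) p =>
          (if f p then c.1 + 1 else c.1,
           if g p then c.2.1 + 1 else c.2.1,
           if h p then c.2.2 + 1 else c.2.2)) (c0, c1, c2)
      = (l.foldl (fun s p => if f p then s + 1 else s) c0,
         l.foldl (fun s p => if g p then s + 1 else s) c1,
         l.foldl (fun s p => if h p then s + 1 else s) c2) := by
  induction l with
  | nil => intro c0 c1 c2; rfl
  | cons x xs ih => intro c0 c1 c2; simp only [List.foldl_cons]; exact ih _ _ _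

-- Python's a %% 40 %% len(pat) collapses to a %% len(pat) since len(pat) divides 40
theorem modmod (i L : Int) (hd : L ∣ 40) (hp : 0 < L) :
    PySem.Int.mod (PySem.Int.mod i 40) L = PySem.Int.mod i L := by
  rw [PySem.Int.mod_eq_emod_of_pos (by norm_num : (0:Int) < 40),
      PySem.Int.mod_eq_emod_of_pos hp, PySem.Int.mod_eq_emod_of_pos hp]
  exact Int.emod_emod_of_dvd i hd

-- the indicator sum over a duplicate-free list containing x.1
theorem sum_indicator (e : Int → Int) (x : Int × Int) :
    ∀ R : List Int, R.Nodup → x.1 ∈ R →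
      (R.map (fun r => if (r, e r) = x then (1 : Int) else 0)).sum
        = if x.2 = e x.1 then 1 else 0 := by
  intro R
  induction R with
  | nil => intro _ h; simp at h
  | cons r R' ih =>
    intro hnd hx
    simp only [List.map_cons, List.sum_cons]
    by_cases hr : r = x.1
    · have h0 : (R'.map (fun r => if (r, e r) = x then (1 : Int) else 0)).sum = 0 := by
        apply List.sum_eq_zero
        intro a ha
        simp only [List.mem_map] at ha
        obtain ⟨r', hr', rfl⟩ := ha
        have hne : r' ≠ x.1 := fun h => (List.nodup_cons.mp hnd).1
          (by rw [show r = r' from hr.trans h.symm]; exact hr')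
        simp [Prod.ext_iff, hne]
      rw [h0, add_zero]
      simp [Prod.ext_iff, hr, eq_comm]
    · have hx' : x.1 ∈ R' := by
        rcases List.mem_cons.mp hx with h | h
        · exact absurd h.symm hr
        · exact h
      rw [ih (List.nodup_cons.mp hnd).2 hx']
      have hne : (r, e r) ≠ x := fun h => hr (congrArg Prod.fst h)
      simp [hne]

-- Σ_{r∈R} count of (r, e r) in m = number of pairs p∈m with p.2 = e p.1
theorem sum_count (e : Int → Int) (R : List Int) (hR : R.Nodup) :
    ∀ m : List (Int × Int), (∀ p ∈ m, p.1 ∈ R) →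
      (R.map (fun r => (m.count (r, e r) : Int))).sum
        = (m.countP (fun p => p.2 == e p.1) : Int) := by
  intro m
  induction m with
  | nil => intro _; simp
  | cons x m' ih =>
    intro hm
    have hx : x.1 ∈ R := hm x (List.mem_cons_self ..)
    have hm' : ∀ p ∈ m', p.1 ∈ R := fun p hp => hm p (List.mem_cons_of_mem _ hp)
    have hsplit : ∀ r : Int, (((x :: m').count (r, e r) : Nat) : Int)
        = (m'.count (r, e r) : Int) + (if (r, e r) = x then (1 : Int) else 0) := by
      intro r
      rw [List.count_cons]
      push_cast
      simp only [beq_iff_eq, eq_comm (a := x)]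
    simp only [hsplit]
    rw [PySem.List.sum_map_add_int, ih hm', sum_indicator e x R hR hx, List.countP_cons]
    push_cast
    by_cases h : x.2 = e x.1 <;> simp [h]

-- B's histogram score for a pattern equals A's counting pass for that pattern
theorem score_eq (pat : List Int) (hlen : (pat.length : Int) ∣ 40) (hpos : 0 < (pat.length : Int))
    (answers : List Int) :
    scorePat (histB answers) pat
      = (PySem.List.enumerate answers 0).foldl
          (fun s p =>
            if (PySem.List.pyGet? pat (PySem.Int.mod p.1 (pat.length : Int))).getD 0 == p.2
            then s + 1 else s) 0 := by
  have hhist : histB answers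
      = ((PySem.List.enumerate answers 0).map
          (fun p => (PySem.Int.mod p.1 40, p.2))).foldl
            (fun d x => d.insert x (d.getD x 0 + 1)) PySem.Dict.empty := by
    rw [List.foldl_map]; rfl
  set e : Int → Int := fun r => (PySem.List.pyGet? pat (PySem.Int.mod r (pat.length : Int))).getD 0 with he
  set m : List (Int × Int) := (PySem.List.enumerate answers 0).map (fun p => (PySem.Int.mod p.1 40, p.2)) with hmdef
  have h1 : scorePat (histB answers) pat
      = ((PySem.List.pyRange 0 40 1).map (fun r => (m.count (r, e r) : Int))).sum := by
    rw [scorePat, PySem.List.foldl_add (g := fun r => (histB answers).getD (r, e r) 0), zero_add]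
    congr 1
    apply List.map_congr_left
    intro r _
    rw [hhist, PySem.Dict.getD_foldl_insert_add_one, PySem.Dict.getD_empty, zero_add]
  rw [h1, sum_count e _ (by decide) m ?_, PySem.List.foldl_count_if, zero_add]
  · rw [hmdef, List.countP_map]
    congr 1
    apply List.countP_congr
    intro p _
    simp only [Function.comp, he]
    rw [modmod p.1 _ hlen hpos]
    simp only [beq_iff_eq]
    exact eq_comm
  · intro p hp
    rw [hmdef] at hp
    simp only [List.mem_map] at hp
    obtain ⟨q, _, rfl⟩ := hp
    rw [PySem.List.mem_pyRange_one]
    exact ⟨PySem.Int.mod_nonneg _ (by norm_num), PySem.Int.mod_lt _ (by norm_num)⟩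

-- A's append loop over the 3-element score list equals B's range-filter comprehension
theorem sel_eq (x y z ma : Int) :
    (PySem.List.enumerate [x, y, z] 0).foldl
        (fun (index : List Int) p => if ma == p.2 then index ++ [p.1 + 1] else index) []
    = ((PySem.List.pyRange 0 3 1).filter
          (fun k => (PySem.List.pyGet? [x, y, z] k).getD 0 == ma)).map (fun k => k + 1) := by
  rw [show PySem.List.pyRange 0 3 1 = [0, 1, 2] from by decide]
  simp only [PySem.List.enumerate_cons, PySem.List.enumerate_nil, List.foldl_cons,
    List.foldl_nil, List.filter_cons, List.filter_nil,
    PySem.List.pyGet?_zero_cons, show PySem.List.pyGet? [x, y, z] 1 = some y from by rfl,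
    show PySem.List.pyGet? [x, y, z] 2 = some z from by rfl,
    Option.getD_some, beq_iff_eq,
    eq_comm (a := x) (b := ma), eq_comm (a := y) (b := ma), eq_comm (a := z) (b := ma)]
  by_cases h1 : ma = x <;> by_cases h2 : ma = y <;> by_cases h3 : ma = z <;>
    simp [h1, h2, h3] <;> split_ifs <;> simp_all

-- ===== VERDICT (by name: the statement is the Claim_ definition above) =====
theorem solution_spec : Claim_equal_solution := by
  intro answers _
  show solution answers = solution_alt answers
  simp only [solution, solution_alt, List.foldl_cons, List.foldl_nil, List.nil_append,
    List.singleton_append]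
  rw [foldl_split3]
  rw [score_eq [1, 2, 3, 4, 5] (by norm_num) (by norm_num),
      score_eq [2, 1, 2, 3, 2, 4, 2, 5] (by norm_num) (by norm_num),
      score_eq [3, 3, 1, 1, 2, 2, 4, 4, 5, 5] (by norm_num) (by norm_num)]
  exact sel_eq _ _ _ _
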